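-- pv_equiv track=rewrite | github.com/Nobody0321/MyCodes | OJ/笔试/airbnb_201909027第一题.py | costsOfNodes
-- ===== SOURCE A (Python) =====
-- def costsOfNodes(lines):
--     # Write your code here
--     trie = {}
--     for line in lines:
--         for i, k in enumerate(line.split(',')):
--             if i == 0:
--                 if k not in trie:
--                     trie[k] = []
--                 key = k
--             else:
--                 if k in trie:
--                     trie[k].append(key)
--                 else:
--                     trie[k] = [key]
--     def dfs(node, trie):
--         if node == None:
--             return
--         if trie[node]:
--             res.extend(trie[node])
--             for each in trie[node]:
--                 dfs(each, trie)
--     ret = []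
--     for k in trie:
--         res = []
--         dfs(k, trie)
--         trie[k] = list(set(res))
--         ret.append(k +"," +str(len(trie[k]) + 1))
--
--     ret = sorted(ret, key=lambda x: x[0])
--     return ret
-- ===== SOURCE B (Python) =====
-- def costsOfNodes(lines):
--     # Build an immutable adjacency dict once, then compute each node's reachable
--     # set by least-fixpoint iteration (frontier saturation): no recursion, no
--     # mutation of the graph; finally format and stable-sort by first character.
--     graph = {}
--     order = []
--     for line in lines:
--         parts = line.split(',')
--         head = parts[0]
--         for t in parts:
--             if t not in graph:
--                 graph[t] = []
--                 order.append(t)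
--         for t in parts[1:]:
--             graph[t].append(head)
--     out = []
--     for node in order:
--         reach = set(graph[node])
--         while True:
--             bigger = reach | {w for u in reach for w in graph[u]}
--             if bigger == reach:
--                 break
--             reach = bigger
--         out.append(node + "," + str(len(reach) + 1))
--     return sorted(out, key=lambda x: x[0])
-- ===== Notes on version B (the rewrite author's own statement) =====
-- stated objective: alternative
-- what changed: A computes each node's ancestor set by an unmemoized recursive dfs over a trie it mutates in place (deduplicating only at the end, exponential blowup on dense DAGs); B builds an immutable adjacency dict once and computes each reachable set by iterating a frontier-saturation step to a fixpoint, with no recursion and no graph mutation.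
import Mathlib
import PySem

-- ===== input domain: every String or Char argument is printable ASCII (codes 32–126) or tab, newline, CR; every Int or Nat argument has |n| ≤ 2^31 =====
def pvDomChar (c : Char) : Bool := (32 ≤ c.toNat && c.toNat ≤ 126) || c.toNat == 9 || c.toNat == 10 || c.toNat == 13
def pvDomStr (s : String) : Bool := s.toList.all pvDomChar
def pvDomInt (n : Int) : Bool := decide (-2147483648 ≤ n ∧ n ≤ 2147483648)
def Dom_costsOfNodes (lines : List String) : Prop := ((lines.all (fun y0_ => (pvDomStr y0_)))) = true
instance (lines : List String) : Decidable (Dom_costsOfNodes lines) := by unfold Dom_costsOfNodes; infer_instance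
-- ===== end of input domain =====

-- B replaces A's graph-mutating recursive dfs (no visited set, post-hoc dedup) by a
-- per-node least-fixpoint saturation of the reachable set over an immutable graph;
-- return-value equivalence on acyclic inputs (A raises RecursionError on cycles).

-- line.split(','): ',' is a nonempty separator, so Python's split never raises; getD [] is never taken
def pvSplit (line : String) : List String := (PySem.Str.split? line ",").getD []

-- ===== PORT A =====
-- one line of A's trie-building loop: fold over enumerate(line.split(',')) carrying (trie, key);
-- the "" seed for key is never read: index 0 comes first and sets it (split is never empty)
def pvBuildLineA (d : PySem.Dict String (List String)) (line : String) :
    PySem.Dict String (List String) × String :=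
  (PySem.List.enumerate (pvSplit line)).foldl
    (fun st ik =>
      if ik.1 = 0 then
        (if st.1.contains ik.2 then st.1 else st.1.insert ik.2 [], ik.2)
      else
        (if st.1.contains ik.2 then st.1.modify ik.2 [] (· ++ [st.2]) else st.1.insert ik.2 [st.2], st.2))
    (d, "")

-- A's dfs; fuel is a totality guard only (on acyclic inputs depth ≤ #keys, see the proofs);
-- trie[node] is t.getD node [] — exact: dfs is only reached on keys of the trie
def pvDfsA (t : PySem.Dict String (List String)) : Nat → String → List String → List String
  | 0, _, res => res
  | f+1, node, res =>
    let l := t.getD node []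
    if l = [] then res
    else l.foldl (fun r e => pvDfsA t f e r) (res ++ l)

def costsOfNodes (lines : List String) : List String :=
  let trie := lines.foldl (fun d line => (pvBuildLineA d line).1) PySem.Dict.empty
  let fuel := trie.keys.length + 1
  let ret := (trie.keys.foldl
    (fun (st : PySem.Dict String (List String) × List String) k =>
      let res := pvDfsA st.1 fuel k []
      -- list(set(res)): consumed only as a set afterwards, so Python's hash order is unobservable
      let s := PySem.Set.ofList res
      (st.1.insert k s, st.2 ++ [k ++ "," ++ PySem.Int.toStr ((s.length : Int) + 1)]))
    (trie, [])).2
  -- key=lambda x: x[0]; every entry contains ',', hence is nonempty, so headD is exact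
  PySem.List.sorted ret (fun x => x.toList.headD ' ') false

-- ===== PORT B =====
-- one line of B's build: insert unseen tokens (tracking insertion order), then append head per edge
def pvBuildLineB (st : PySem.Dict String (List String) × List String) (line : String) :
    PySem.Dict String (List String) × List String :=
  let parts := pvSplit line
  let head := parts.headD ""   -- parts is never [], so headD is exact
  let st1 := parts.foldl
    (fun (st : PySem.Dict String (List String) × List String) t =>
      if st.1.contains t then st else (st.1.insert t [], st.2 ++ [t])) st
  ((parts.drop 1).foldl (fun g t => g.modify t [] (· ++ [head])) st1.1, st1.2)

-- B's 'while True' saturation loop; fuel is a totality guard (the fixpoint is reached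
-- within #keys+1 rounds, each earlier round strictly grows the set)
def pvSatB (g : PySem.Dict String (List String)) : Nat → PySem.Set String → PySem.Set String
  | 0, reach => reach
  | f+1, reach =>
    let bigger := PySem.Set.union reach (reach.flatMap (fun u => g.getD u []))
    if PySem.Set.equal bigger reach then reach else pvSatB g f bigger

def costsOfNodes_alt (lines : List String) : List String :=
  let gb := lines.foldl pvBuildLineB (PySem.Dict.empty, [])
  let out := gb.2.foldl (fun out node =>
      -- graph[node] / graph[u]: exact, every node handled is a key of the graph
      let reach := pvSatB gb.1 (gb.1.keys.length + 1) (PySem.Set.ofList (gb.1.getD node []))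
      out ++ [node ++ "," ++ PySem.Int.toStr ((reach.length : Int) + 1)]) []
  PySem.List.sorted out (fun x => x.toList.headD ' ') false

-- ===== PRECONDITION & SPEC =====
-- parent→child edges of the input, and all tokens, read off the lines directly
def pvEdges (lines : List String) : List (String × String) :=
  lines.flatMap (fun line =>
    match pvSplit line with
    | [] => []
    | h :: rest => rest.map (fun t => (t, h)))

def pvNodes (lines : List String) : List String :=
  lines.flatMap (fun line => pvSplit line)

def pvSuccs (es : List (String × String)) (u : String) : List String :=
  (es.filter (fun e => e.1 == u)).map (·.2)

def pvSatStep (es : List (String × String)) (s : List String) : List String :=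
  PySem.Set.update s (s.flatMap (pvSuccs es))

def pvSat (es : List (String × String)) (n : Nat) (s : List String) : List String :=
  (pvSatStep es)^[n] s

-- Pre_ excludes exactly the inputs on which A's unguarded recursion does not return
-- (RecursionError): those whose parent/child edge relation has a directed cycle
def Pre_costsOfNodes (lines : List String) : Prop :=
  ∀ v ∈ pvNodes lines,
    v ∉ pvSat (pvEdges lines) (pvNodes lines).length (PySem.Set.ofList (pvSuccs (pvEdges lines) v))
instance (lines : List String) : Decidable (Pre_costsOfNodes lines) := by
  unfold Pre_costsOfNodes; infer_instance

def pvWitness_costsOfNodes : List String := ["b,a", "c,a,b"]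

def Spec_costsOfNodes (lines : List String) (out : List String) : Prop := out = costsOfNodes_alt lines
instance (lines : List String) (out : List String) : Decidable (Spec_costsOfNodes lines out) := by
  unfold Spec_costsOfNodes; infer_instance

-- ===== CLAIM (what is proved, stated in full; the proofs are below) =====
def Claim_equal_costsOfNodes : Prop :=
  ∀ (lines : List String), Dom_costsOfNodes lines → Pre_costsOfNodes lines →
    Spec_costsOfNodes lines (costsOfNodes lines)

-- ===== LEMMAS AND PROOFS =====

-- ---- generic dict/graph notions used by the proofs ----
def pvIns (d : PySem.Dict String (List String)) (t : String) : PySem.Dict String (List String) :=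
  if d.contains t then d else d.insert t []

def pvApp (h : String) (d : PySem.Dict String (List String)) (t : String) :
    PySem.Dict String (List String) :=
  d.modify t [] (· ++ [h])

def pvAStep (h : String) (d : PySem.Dict String (List String)) (t : String) :
    PySem.Dict String (List String) :=
  if d.contains t then d.modify t [] (· ++ [h]) else d.insert t [h]

-- normal form of one line's processing
def pvLineG (d : PySem.Dict String (List String)) : List String → PySem.Dict String (List String)
  | [] => d
  | h :: rest => rest.foldl (pvAStep h) (pvIns d h)

def pvG (lines : List String) : PySem.Dict String (List String) :=
  lines.foldl (fun d line => pvLineG d (pvSplit line)) PySem.Dict.empty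

-- reachability along the edge relation of a dict graph
def pvRP (g : PySem.Dict String (List String)) (v x : String) : Prop :=
  Relation.TransGen (fun a b => b ∈ g.getD a []) v x

def pvRPE (es : List (String × String)) (v x : String) : Prop :=
  Relation.TransGen (fun a b => (a, b) ∈ es) v x

-- ---- Section 1: small dict lemmas about the three elementary build steps ----
lemma pvIns_getD (d : PySem.Dict String (List String)) (t u : String) :
    (pvIns d t).getD u [] = d.getD u [] := by
  unfold pvIns
  split
  · rfl
  · rename_i h
    rw [PySem.Dict.getD_insert]
    split
    · rename_i he; subst he
      rw [PySem.Dict.getD_of_not_contains d [] (by simpa using h)]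
    · rfl

lemma pvAStep_getD (h : String) (d : PySem.Dict String (List String)) (t u : String) :
    (pvAStep h d t).getD u [] = if u = t then d.getD u [] ++ [h] else d.getD u [] := by
  unfold pvAStep
  split
  · rw [PySem.Dict.getD_modify]
    split
    · rename_i he; subst he; rfl
    · rfl
  · rename_i hc
    rw [PySem.Dict.getD_insert]
    split
    · rename_i he; subst he
      rw [PySem.Dict.getD_of_not_contains d [] (by simpa using hc)]
      rfl
    · rfl

lemma pvAStep_eq_app_ins (h : String) (d : PySem.Dict String (List String)) (t : String) :
    pvAStep h d t = pvApp h (pvIns d t) t := by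
  unfold pvAStep pvApp pvIns
  split
  · rfl
  · rename_i hc
    rw [PySem.Dict.modify]
    rw [PySem.Dict.getD_insert_self, PySem.Dict.insert_insert_self]
    rfl

lemma pvApp_contains (h : String) (d : PySem.Dict String (List String)) (t u : String) :
    (pvApp h d t).contains u = (u == t || d.contains u) := by
  unfold pvApp
  rw [PySem.Dict.contains_modify]

lemma pvIns_mem_keys (d : PySem.Dict String (List String)) (t u : String) :
    u ∈ (pvIns d t).keys ↔ u = t ∨ u ∈ d.keys := by
  unfold pvIns
  split
  · rename_i hc
    constructor
    · exact fun h => Or.inr h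
    · rintro (rfl | h)
      · exact (PySem.Dict.contains_iff_mem_keys d u).1 hc
      · exact h
  · exact PySem.Dict.mem_keys_insert d t u []

lemma pvAStep_mem_keys (h : String) (d : PySem.Dict String (List String)) (t u : String) :
    u ∈ (pvAStep h d t).keys ↔ u = t ∨ u ∈ d.keys := by
  unfold pvAStep
  split
  · rw [PySem.Dict.keys_modify, PySem.Dict.mem_keys_insert]
  · rw [PySem.Dict.mem_keys_insert]

lemma pvApp_keys (h : String) (d : PySem.Dict String (List String)) (t : String)
    (ht : t ∈ d.keys) : (pvApp h d t).keys = d.keys := by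
  unfold pvApp
  rw [PySem.Dict.keys_modify]
  exact PySem.Dict.keys_insert_of_contains d _ ((PySem.Dict.contains_iff_mem_keys d t).2 ht)

-- insert-new at u and append-at-existing-t commute
lemma pvIns_pvApp_comm (h : String) (d : PySem.Dict String (List String)) (t u : String)
    (ht : t ∈ d.keys) :
    pvIns (pvApp h d t) u = pvApp h (pvIns d u) t := by
  by_cases hu : u ∈ d.keys
  · have hcu : d.contains u = true := (PySem.Dict.contains_iff_mem_keys d u).2 hu
    unfold pvIns
    rw [pvApp_contains]
    simp [hcu]
  · have hcu : d.contains u = false :=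
      Bool.eq_false_iff.2 (fun hc => hu ((PySem.Dict.contains_iff_mem_keys d u).1 hc))
    have hct : d.contains t = true := (PySem.Dict.contains_iff_mem_keys d t).2 ht
    have hut : u ≠ t := fun he => hu (he ▸ ht)
    unfold pvIns
    rw [pvApp_contains]
    rw [if_neg (by simp [hcu, hut]), if_neg (by simp [hcu])]
    unfold pvApp
    rw [PySem.Dict.modify, PySem.Dict.modify]
    rw [PySem.Dict.getD_insert_of_ne _ _ _ hut.symm]
    apply PySem.Dict.ext
    rw [PySem.Dict.items_insert_of_not_contains _ _
      (by simp [PySem.Dict.contains_insert, hcu, hut])]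
    rw [PySem.Dict.items_insert_of_contains _ _ hct]
    rw [PySem.Dict.items_insert_of_contains _ _
      (by simp [PySem.Dict.contains_insert, hct])]
    rw [PySem.Dict.items_insert_of_not_contains _ _ hcu]
    rw [List.map_append]
    simp [hut]

-- ---- Section 2: A's enumerate-fold over one line is pvLineG ----
lemma pvEnumFoldA (rest : List String) : ∀ (s : Int), 1 ≤ s →
    ∀ (d : PySem.Dict String (List String)) (key : String),
    (PySem.List.enumerate rest s).foldl
      (fun st ik =>
        if ik.1 = 0 then
          (if st.1.contains ik.2 then st.1 else st.1.insert ik.2 [], ik.2)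
        else
          (if st.1.contains ik.2 then st.1.modify ik.2 [] (· ++ [st.2])
           else st.1.insert ik.2 [st.2], st.2))
      (d, key)
    = (rest.foldl (pvAStep key) d, key) := by
  induction rest with
  | nil => intro s hs d key; simp [PySem.List.enumerate]
  | cons t ts ih =>
    intro s hs d key
    rw [PySem.List.enumerate_cons]
    rw [List.foldl_cons]
    have hs0 : ¬ (s = 0) := by omega
    simp only [hs0, if_false]
    rw [ih (s+1) (by omega)]
    rw [List.foldl_cons]
    rfl

lemma pvBuildLineA_eq (d : PySem.Dict String (List String)) (line : String) :
    (pvBuildLineA d line).1 = pvLineG d (pvSplit line) := by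
  unfold pvBuildLineA
  cases hp : pvSplit line with
  | nil => simp [PySem.List.enumerate, pvLineG]
  | cons h rest =>
    rw [PySem.List.enumerate_cons, List.foldl_cons]
    norm_num
    rw [pvEnumFoldA rest 1 (by omega)]
    unfold pvLineG pvIns
    rfl

lemma pvTrieA_eq (lines : List String) :
    lines.foldl (fun d line => (pvBuildLineA d line).1) PySem.Dict.empty = pvG lines := by
  unfold pvG
  apply PySem.List.foldl_congr_mem
  intro d line _
  exact pvBuildLineA_eq d line

-- ---- Section 3: B's build is the same dict, and its order list is the key list ----
lemma pvInsFold_pair (l : List String) :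
    ∀ (st : PySem.Dict String (List String) × List String), st.2 = st.1.keys →
    (l.foldl (fun (st : PySem.Dict String (List String) × List String) t =>
        if st.1.contains t then st else (st.1.insert t [], st.2 ++ [t])) st)
      = (l.foldl pvIns st.1, (l.foldl pvIns st.1).keys) := by
  induction l with
  | nil => intro st h; cases st; simp_all
  | cons t ts ih =>
    intro st h
    rw [List.foldl_cons, List.foldl_cons]
    by_cases hc : st.1.contains t
    · have : pvIns st.1 t = st.1 := by unfold pvIns; rw [if_pos hc]
      rw [this]
      simp only [hc, if_true]
      exact ih st h
    · have hins : pvIns st.1 t = st.1.insert t [] := by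
        unfold pvIns; rw [if_neg hc]
      rw [hins]
      simp only [hc]
      rw [if_neg (by simp)]
      apply ih
      simp only [h]
      exact (PySem.Dict.keys_insert_of_not_contains st.1 [] (by simpa using hc)).symm

lemma pvAppFold_keys (h : String) (l : List String) :
    ∀ (d : PySem.Dict String (List String)), (∀ t ∈ l, t ∈ d.keys) →
    (l.foldl (pvApp h) d).keys = d.keys := by
  induction l with
  | nil => intro d _; rfl
  | cons t ts ih =>
    intro d hl
    rw [List.foldl_cons]
    have ht : t ∈ d.keys := hl t (by simp)
    rw [ih (pvApp h d t) (fun u hu => by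
      rw [pvApp_keys h d t ht]; exact hl u (by simp [hu]))]
    exact pvApp_keys h d t ht

lemma pvInsFold_mem_keys (l : List String) :
    ∀ (d : PySem.Dict String (List String)) (u : String),
    u ∈ (l.foldl pvIns d).keys ↔ u ∈ l ∨ u ∈ d.keys := by
  induction l with
  | nil => simp
  | cons t ts ih =>
    intro d u
    rw [List.foldl_cons, ih, pvIns_mem_keys]
    simp only [List.mem_cons]
    tauto

-- move an append-at-t past a whole insert-fold (t already a key)
lemma pvInsFold_pvApp_comm (h : String) (ts : List String) :
    ∀ (d : PySem.Dict String (List String)) (t : String), t ∈ d.keys →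
    ts.foldl pvIns (pvApp h d t) = pvApp h (ts.foldl pvIns d) t := by
  induction ts with
  | nil => intro d t _; rfl
  | cons u us ih =>
    intro d t ht
    rw [List.foldl_cons, List.foldl_cons]
    rw [pvIns_pvApp_comm h d t u ht]
    exact ih (pvIns d u) t ((pvIns_mem_keys d u t).2 (Or.inr ht))

-- the interleaved A-pass equals B's two passes
lemma pvAStepFold_eq (h : String) (rest : List String) :
    ∀ (d : PySem.Dict String (List String)), h ∈ d.keys →
    rest.foldl (pvAStep h) d = rest.foldl (pvApp h) (rest.foldl pvIns d) := by
  induction rest with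
  | nil => intro d _; rfl
  | cons t ts ih =>
    intro d hd
    rw [List.foldl_cons, List.foldl_cons, List.foldl_cons]
    rw [pvAStep_eq_app_ins]
    rw [ih (pvApp h (pvIns d t) t) (by
      rw [pvApp_keys h (pvIns d t) t ((pvIns_mem_keys d t t).2 (Or.inl rfl))]
      exact (pvIns_mem_keys d t h).2 (Or.inr hd))]
    rw [pvInsFold_pvApp_comm h ts (pvIns d t) t ((pvIns_mem_keys d t t).2 (Or.inl rfl))]

lemma pvBuildLineB_eq (st : PySem.Dict String (List String) × List String) (line : String)
    (h : st.2 = st.1.keys) :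
    pvBuildLineB st line
      = (pvLineG st.1 (pvSplit line), (pvLineG st.1 (pvSplit line)).keys) := by
  unfold pvBuildLineB
  cases hp : pvSplit line with
  | nil =>
    cases st
    simp_all [pvLineG]
  | cons hd rest =>
    simp only [List.headD_cons, List.drop_succ_cons, List.drop_zero]
    rw [pvInsFold_pair (hd :: rest) st h]
    have hfold : ∀ (g0 : PySem.Dict String (List String)),
        rest.foldl (fun g t => g.modify t [] (· ++ [hd])) g0 = rest.foldl (pvApp hd) g0 := by
      intro g0
      apply PySem.List.foldl_congr_mem
      intro g t _
      rfl
    rw [hfold]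
    have hins : (hd :: rest).foldl pvIns st.1 = rest.foldl pvIns (pvIns st.1 hd) :=
      List.foldl_cons ..
    have hkeys : ∀ t ∈ rest, t ∈ ((hd :: rest).foldl pvIns st.1).keys := by
      intro t htr
      rw [pvInsFold_mem_keys]
      exact Or.inl (by simp [htr])
    have hdict : rest.foldl (pvApp hd) ((hd :: rest).foldl pvIns st.1)
        = pvLineG st.1 (hd :: rest) := by
      show _ = rest.foldl (pvAStep hd) (pvIns st.1 hd)
      rw [pvAStepFold_eq hd rest (pvIns st.1 hd) ((pvIns_mem_keys st.1 hd hd).2 (Or.inl rfl))]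
      rw [hins]
    rw [hdict]
    have hk2 : (pvLineG st.1 (hd :: rest)).keys = ((hd :: rest).foldl pvIns st.1).keys := by
      rw [← hdict, pvAppFold_keys hd rest _ hkeys]
    rw [hk2]

lemma pvGB_aux (lines : List String) :
    ∀ (st : PySem.Dict String (List String) × List String), st.2 = st.1.keys →
    lines.foldl pvBuildLineB st
      = (lines.foldl (fun d line => pvLineG d (pvSplit line)) st.1,
         (lines.foldl (fun d line => pvLineG d (pvSplit line)) st.1).keys) := by
  induction lines with
  | nil => intro st h; cases st; simp_all
  | cons line ls ih =>
    intro st h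
    rw [List.foldl_cons, pvBuildLineB_eq st line h, List.foldl_cons]
    exact ih _ rfl

lemma pvGB_eq (lines : List String) :
    lines.foldl pvBuildLineB (PySem.Dict.empty, []) = (pvG lines, (pvG lines).keys) := by
  have h := pvGB_aux lines (PySem.Dict.empty, []) (by rfl)
  rw [h]
  rfl

-- ---- Section 4: adjacency and key set of the built graph ----
lemma pvAStepFold_getD_mem (h : String) (rest : List String) :
    ∀ (d : PySem.Dict String (List String)) (u x : String),
    x ∈ (rest.foldl (pvAStep h) d).getD u [] ↔ x ∈ d.getD u [] ∨ (u ∈ rest ∧ x = h) := by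
  induction rest with
  | nil => simp
  | cons t ts ih =>
    intro d u x
    rw [List.foldl_cons, ih, pvAStep_getD]
    by_cases hut : u = t
    · subst hut
      simp only [if_true, List.mem_append, List.mem_singleton]
      tauto
    · rw [if_neg hut]
      simp only [List.mem_cons]
      tauto

lemma pvLineG_getD_mem (parts : List String) (d : PySem.Dict String (List String)) (u x : String) :
    x ∈ (pvLineG d parts).getD u [] ↔
      x ∈ d.getD u [] ∨ (match parts with | [] => False | h :: rest => u ∈ rest ∧ x = h) := by
  cases parts with
  | nil => simp [pvLineG]
  | cons h rest =>
    show x ∈ (rest.foldl (pvAStep h) (pvIns d h)).getD u [] ↔ _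
    rw [pvAStepFold_getD_mem, pvIns_getD]

lemma pvG_getD_mem_aux (lines : List String) :
    ∀ (d : PySem.Dict String (List String)) (u x : String),
    x ∈ (lines.foldl (fun d line => pvLineG d (pvSplit line)) d).getD u [] ↔
      x ∈ d.getD u [] ∨ (u, x) ∈ pvEdges lines := by
  induction lines with
  | nil => simp [pvEdges]
  | cons line ls ih =>
    intro d u x
    rw [List.foldl_cons, ih, pvLineG_getD_mem]
    have : pvEdges (line :: ls)
        = (match pvSplit line with
           | [] => []
           | h :: rest => rest.map (fun t => (t, h))) ++ pvEdges ls := by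
      unfold pvEdges
      rw [List.flatMap_cons]
    rw [this, List.mem_append]
    cases hp : pvSplit line with
    | nil => simp
    | cons h rest =>
      simp only [List.mem_map]
      constructor
      · rintro ((hx | ⟨hu, rfl⟩) | he)
        · exact Or.inl hx
        · exact Or.inr (Or.inl ⟨u, hu, rfl⟩)
        · exact Or.inr (Or.inr he)
      · rintro (hx | (⟨t, ht, he⟩ | he))
        · exact Or.inl (Or.inl hx)
        · cases he
          exact Or.inl (Or.inr ⟨ht, rfl⟩)
        · exact Or.inr he

lemma pvG_getD_mem (lines : List String) (u x : String) :
    x ∈ (pvG lines).getD u [] ↔ (u, x) ∈ pvEdges lines := by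
  unfold pvG
  rw [pvG_getD_mem_aux]
  simp [PySem.Dict.getD_empty]

lemma pvLineG_mem_keys (parts : List String) (d : PySem.Dict String (List String)) (u : String) :
    u ∈ (pvLineG d parts).keys ↔ u ∈ parts ∨ u ∈ d.keys := by
  cases parts with
  | nil => simp [pvLineG]
  | cons h rest =>
    show u ∈ (rest.foldl (pvAStep h) (pvIns d h)).keys ↔ _
    have haux : ∀ (l : List String) (d : PySem.Dict String (List String)),
        u ∈ (l.foldl (pvAStep h) d).keys ↔ u ∈ l ∨ u ∈ d.keys := by
      intro l
      induction l with
      | nil => simp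
      | cons t ts ih =>
        intro d
        rw [List.foldl_cons, ih, pvAStep_mem_keys]
        simp only [List.mem_cons]
        tauto
    rw [haux, pvIns_mem_keys]
    simp only [List.mem_cons]
    tauto

lemma pvG_mem_keys (lines : List String) (u : String) :
    u ∈ (pvG lines).keys ↔ u ∈ pvNodes lines := by
  have haux : ∀ (d : PySem.Dict String (List String)),
      u ∈ (lines.foldl (fun d line => pvLineG d (pvSplit line)) d).keys ↔
        u ∈ pvNodes lines ∨ u ∈ d.keys := by
    induction lines with
    | nil => simp [pvNodes]
    | cons line ls ih =>
      intro d
      rw [List.foldl_cons, ih, pvLineG_mem_keys]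
      have : pvNodes (line :: ls) = pvSplit line ++ pvNodes ls := by
        unfold pvNodes
        rw [List.flatMap_cons]
      rw [this, List.mem_append]
      tauto
  unfold pvG
  rw [haux]
  simp [PySem.Dict.keys, PySem.Dict.empty]

-- edge endpoints are nodes
lemma pvEdges_mem_nodes (lines : List String) (u x : String)
    (h : (u, x) ∈ pvEdges lines) : u ∈ pvNodes lines ∧ x ∈ pvNodes lines := by
  unfold pvEdges at h
  rw [List.mem_flatMap] at h
  obtain ⟨line, hline, hmem⟩ := h
  cases hp : pvSplit line with
  | nil => rw [hp] at hmem; simp at hmem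
  | cons hd rest =>
    rw [hp] at hmem
    rw [List.mem_map] at hmem
    obtain ⟨t, ht, he⟩ := hmem
    cases he
    constructor
    · unfold pvNodes
      rw [List.mem_flatMap]
      exact ⟨line, hline, by rw [hp]; simp [ht]⟩
    · unfold pvNodes
      rw [List.mem_flatMap]
      exact ⟨line, hline, by rw [hp]; simp⟩

lemma pvG_values_mem_keys (lines : List String) (u x : String)
    (h : x ∈ (pvG lines).getD u []) : x ∈ (pvG lines).keys := by
  rw [pvG_mem_keys]
  exact (pvEdges_mem_nodes lines u x ((pvG_getD_mem lines u x).1 h)).2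

-- ---- Section 5: saturation of the edge relation ----
lemma pvSuccs_mem (es : List (String × String)) (u y : String) :
    y ∈ pvSuccs es u ↔ (u, y) ∈ es := by
  unfold pvSuccs
  rw [List.mem_map]
  constructor
  · rintro ⟨e, he, rfl⟩
    rw [List.mem_filter] at he
    obtain ⟨he, hb⟩ := he
    have : e.1 = u := by simpa using hb
    cases e
    cases this
    exact he
  · intro h
    exact ⟨(u, y), List.mem_filter.2 ⟨h, by simp⟩, rfl⟩

lemma pvSatStep_mem (es : List (String × String)) (s : List String) (y : String) :
    y ∈ pvSatStep es s ↔ y ∈ s ∨ ∃ u ∈ s, (u, y) ∈ es := by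
  unfold pvSatStep
  rw [PySem.Set.mem_update, List.mem_flatMap]
  constructor
  · rintro (h | ⟨u, hu, hy⟩)
    · exact Or.inl h
    · exact Or.inr ⟨u, hu, (pvSuccs_mem es u y).1 hy⟩
  · rintro (h | ⟨u, hu, hy⟩)
    · exact Or.inl h
    · exact Or.inr ⟨u, hu, (pvSuccs_mem es u y).2 hy⟩

lemma pvSatStep_subset (es : List (String × String)) (s : List String) (x : String)
    (h : x ∈ s) : x ∈ pvSatStep es s := (pvSatStep_mem es s x).2 (Or.inl h)

lemma pvSatStep_nodup (es : List (String × String)) (s : List String) (h : s.Nodup) :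
    (pvSatStep es s).Nodup := PySem.Set.nodup_update s _ h

lemma pvSatStep_eq_or_lt (es : List (String × String)) (s : List String) :
    pvSatStep es s = s ∨ s.length < (pvSatStep es s).length := by
  unfold pvSatStep
  rw [PySem.Set.update_eq_append_filter]
  cases hf : List.filter (fun y => !PySem.Set.contains s y)
      (PySem.Set.ofList (s.flatMap (pvSuccs es))) with
  | nil => exact Or.inl (by simp)
  | cons a l => exact Or.inr (by simp)

lemma pvSat_mono_mem (es : List (String × String)) (k : Nat) :
    ∀ (s : List String) (x : String), x ∈ s → x ∈ (pvSatStep es)^[k] s := by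
  induction k with
  | zero => intro s x h; exact h
  | succ k ih =>
    intro s x h
    rw [Function.iterate_succ_apply]
    exact ih _ x (pvSatStep_subset es s x h)

lemma pvSat_nodup (es : List (String × String)) (k : Nat) (s : List String) (h : s.Nodup) :
    ((pvSatStep es)^[k] s).Nodup := by
  induction k with
  | zero => exact h
  | succ k ih =>
    rw [Function.iterate_succ_apply']
    exact pvSatStep_nodup es _ ih

lemma pvSat_subset_nodes (lines : List String) (k : Nat) (s : List String)
    (h : ∀ x ∈ s, x ∈ pvNodes lines) :
    ∀ x ∈ (pvSatStep (pvEdges lines))^[k] s, x ∈ pvNodes lines := by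
  induction k with
  | zero => exact h
  | succ k ih =>
    rw [Function.iterate_succ_apply']
    intro x hx
    rcases (pvSatStep_mem _ _ x).1 hx with h1 | ⟨u, _, hu⟩
    · exact ih x h1
    · exact (pvEdges_mem_nodes lines u x hu).2

lemma pvNodup_subset_length {s t : List String} (hnd : s.Nodup) (hsub : ∀ x ∈ s, x ∈ t) :
    s.length ≤ t.length := by
  calc s.length = s.toFinset.card := (List.toFinset_card_of_nodup hnd).symm
    _ ≤ t.toFinset.card := Finset.card_le_card (fun x hx =>
        List.mem_toFinset.2 (hsub x (List.mem_toFinset.1 hx)))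
    _ ≤ t.length := List.toFinset_card_le t

lemma pvSat_fixed (lines : List String) (s : List String) (hnd : s.Nodup)
    (hsub : ∀ x ∈ s, x ∈ pvNodes lines) :
    pvSatStep (pvEdges lines) (pvSat (pvEdges lines) (pvNodes lines).length s)
      = pvSat (pvEdges lines) (pvNodes lines).length s := by
  set es := pvEdges lines with hes
  set N := (pvNodes lines).length with hN
  unfold pvSat
  by_contra hne
  have hnofix : ∀ i, i ≤ N → pvSatStep es ((pvSatStep es)^[i] s) ≠ (pvSatStep es)^[i] s := by
    intro i hi hfix
    apply hne
    have : (pvSatStep es)^[N] s = (pvSatStep es)^[i] s := by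
      have : (pvSatStep es)^[N - i] ((pvSatStep es)^[i] s) = (pvSatStep es)^[i] s :=
        Function.iterate_fixed hfix (N - i)
      calc (pvSatStep es)^[N] s = (pvSatStep es)^[N - i + i] s := by
              rw [Nat.sub_add_cancel hi]
        _ = (pvSatStep es)^[N - i] ((pvSatStep es)^[i] s) := by
              rw [Function.iterate_add_apply]
        _ = (pvSatStep es)^[i] s := this
    rw [this]
    exact hfix
  have hgrow : ∀ i, i ≤ N → s.length + i ≤ ((pvSatStep es)^[i] s).length := by
    intro i
    induction i with
    | zero => intro _; simp
    | succ i ih =>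
      intro hi
      have h1 := ih (by omega)
      rcases pvSatStep_eq_or_lt es ((pvSatStep es)^[i] s) with hfix | hlt
      · exact absurd hfix (hnofix i (by omega))
      · rw [Function.iterate_succ_apply']
        omega
  have hlenN : ((pvSatStep es)^[N] s).length ≤ N :=
    pvNodup_subset_length (pvSat_nodup es N s hnd) (pvSat_subset_nodes lines N s hsub)
  have := hgrow N (le_refl N)
  have hs0 : s.length = 0 := by omega
  have hsnil : s = [] := List.length_eq_zero_iff.1 hs0
  subst hsnil
  have hfix0 : pvSatStep es ([] : List String) = [] := rfl
  exact hnofix 0 (by omega) hfix0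

lemma pvSat_sound (es : List (String × String)) (v : String) (k : Nat) :
    ∀ (s : List String), (∀ x ∈ s, pvRPE es v x) →
    ∀ x ∈ (pvSatStep es)^[k] s, pvRPE es v x := by
  induction k with
  | zero => intro s h; exact h
  | succ k ih =>
    intro s h
    rw [Function.iterate_succ_apply]
    apply ih
    intro x hx
    rcases (pvSatStep_mem es s x).1 hx with h1 | ⟨u, hu, he⟩
    · exact h x h1
    · exact Relation.TransGen.tail (h u hu) he

lemma pvSuccs_nodes (lines : List String) (v x : String)
    (h : x ∈ PySem.Set.ofList (pvSuccs (pvEdges lines) v)) : x ∈ pvNodes lines := by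
  rw [PySem.Set.mem_ofList, pvSuccs_mem] at h
  exact (pvEdges_mem_nodes lines v x h).2

lemma pvSat_complete (lines : List String) (v x : String)
    (h : pvRPE (pvEdges lines) v x) :
    x ∈ pvSat (pvEdges lines) (pvNodes lines).length
        (PySem.Set.ofList (pvSuccs (pvEdges lines) v)) := by
  induction h with
  | single he =>
    apply pvSat_mono_mem
    rw [PySem.Set.mem_ofList, pvSuccs_mem]
    exact he
  | tail _ he ih =>
    rename_i b c _
    have hfix := pvSat_fixed lines (PySem.Set.ofList (pvSuccs (pvEdges lines) v))
      (PySem.Set.nodup_ofList _) (fun y hy => pvSuccs_nodes lines v y hy)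
    rw [← hfix]
    rw [pvSatStep_mem]
    exact Or.inr ⟨b, ih, he⟩

lemma pvSat_mem_iff (lines : List String) (v x : String) :
    x ∈ pvSat (pvEdges lines) (pvNodes lines).length
        (PySem.Set.ofList (pvSuccs (pvEdges lines) v)) ↔ pvRPE (pvEdges lines) v x := by
  constructor
  · intro h
    exact pvSat_sound (pvEdges lines) v _ _
      (fun y hy => Relation.TransGen.single (by
        rw [PySem.Set.mem_ofList, pvSuccs_mem] at hy; exact hy)) x h
  · exact pvSat_complete lines v x

-- ---- Section 6: the measure ----
def pvM (lines : List String) (v : String) : Nat :=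
  (pvSat (pvEdges lines) (pvNodes lines).length
    (PySem.Set.ofList (pvSuccs (pvEdges lines) v))).length

lemma pvRP_iff_RPE (lines : List String) (v x : String) :
    pvRP (pvG lines) v x ↔ pvRPE (pvEdges lines) v x := by
  constructor
  · exact Relation.TransGen.mono (fun a b h => (pvG_getD_mem lines a b).1 h)
  · exact Relation.TransGen.mono (fun a b h => (pvG_getD_mem lines a b).2 h)

lemma pvRPE_target_nodes (lines : List String) (v x : String)
    (h : pvRPE (pvEdges lines) v x) : x ∈ pvNodes lines := by
  cases h with
  | single he => exact (pvEdges_mem_nodes lines v x he).2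
  | tail h1 he => exact (pvEdges_mem_nodes lines _ x he).2

lemma pvAcyclicE (lines : List String) (hpre : Pre_costsOfNodes lines) (v : String) :
    ¬ pvRPE (pvEdges lines) v v := by
  intro h
  exact hpre v (pvRPE_target_nodes lines v v h) (pvSat_complete lines v v h)

lemma pvM_lt (lines : List String) (hpre : Pre_costsOfNodes lines) (v w : String)
    (h : pvRPE (pvEdges lines) v w) : pvM lines w < pvM lines v := by
  unfold pvM
  have hndV : (pvSat (pvEdges lines) (pvNodes lines).length
      (PySem.Set.ofList (pvSuccs (pvEdges lines) v))).Nodup :=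
    pvSat_nodup (pvEdges lines) (pvNodes lines).length _
      (PySem.Set.nodup_ofList (pvSuccs (pvEdges lines) v))
  have hndW : (pvSat (pvEdges lines) (pvNodes lines).length
      (PySem.Set.ofList (pvSuccs (pvEdges lines) w))).Nodup :=
    pvSat_nodup (pvEdges lines) (pvNodes lines).length _
      (PySem.Set.nodup_ofList (pvSuccs (pvEdges lines) w))
  rw [← List.toFinset_card_of_nodup hndV, ← List.toFinset_card_of_nodup hndW]
  apply Finset.card_lt_card
  constructor
  · intro x hx
    rw [List.mem_toFinset] at hx ⊢
    rw [pvSat_mem_iff] at hx ⊢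
    exact Relation.TransGen.trans h hx
  · intro hsub
    have hw : w ∈ (pvSat (pvEdges lines) (pvNodes lines).length
        (PySem.Set.ofList (pvSuccs (pvEdges lines) v))).toFinset := by
      rw [List.mem_toFinset, pvSat_mem_iff]
      exact h
    have := hsub hw
    rw [List.mem_toFinset, pvSat_mem_iff] at this
    exact pvAcyclicE lines hpre w this

lemma pvM_le_keys (lines : List String) (v : String) :
    pvM lines v ≤ (pvG lines).keys.length := by
  unfold pvM
  apply pvNodup_subset_length
  · exact pvSat_nodup (pvEdges lines) (pvNodes lines).length _
      (PySem.Set.nodup_ofList _)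
  · intro x hx
    rw [pvG_mem_keys]
    exact pvSat_subset_nodes lines (pvNodes lines).length _
      (fun y hy => pvSuccs_nodes lines v y hy) x hx

-- ---- Section 7: A's dfs collects exactly the reachable set ----
lemma pvDfsA_acc (t : PySem.Dict String (List String)) : ∀ (f : Nat) (v : String) (res : List String),
    pvDfsA t f v res = res ++ pvDfsA t f v [] := by
  intro f
  induction f with
  | zero => intro v res; simp [pvDfsA]
  | succ f ih =>
    intro v res
    show (let l := t.getD v [];
          if l = [] then res else l.foldl (fun r e => pvDfsA t f e r) (res ++ l)) = _
    by_cases hl : t.getD v [] = []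
    · simp only [hl, if_true, pvDfsA]
      simp
    · simp only [hl, if_false, pvDfsA]
      rw [PySem.List.foldl_congr_mem (t.getD v []) _ (fun r e => r ++ pvDfsA t f e [])
          _ (fun acc x _ => ih x acc)]
      rw [PySem.List.foldl_congr_mem (t.getD v []) _ (fun r e => r ++ pvDfsA t f e [])
          _ (fun acc x _ => ih x acc)]
      rw [PySem.List.foldl_append_eq_flatMap, PySem.List.foldl_append_eq_flatMap]
      simp

lemma pvDfsA_eq (t : PySem.Dict String (List String)) (f : Nat) (v : String)
    (hl : t.getD v [] ≠ []) :
    pvDfsA t (f+1) v [] = t.getD v [] ++ (t.getD v []).flatMap (fun e => pvDfsA t f e []) := by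
  show (let l := t.getD v [];
        if l = [] then [] else l.foldl (fun r e => pvDfsA t f e r) ([] ++ l)) = _
  simp only [hl, if_false]
  rw [PySem.List.foldl_congr_mem (t.getD v []) _ (fun r e => r ++ pvDfsA t f e [])
      _ (fun acc x _ => pvDfsA_acc t f x acc)]
  rw [PySem.List.foldl_append_eq_flatMap]
  simp

lemma pvDfsA_nil (t : PySem.Dict String (List String)) (f : Nat) (v : String)
    (hl : t.getD v [] = []) : pvDfsA t (f+1) v [] = [] := by
  show (let l := t.getD v [];
        if l = [] then [] else l.foldl (fun r e => pvDfsA t f e r) ([] ++ l)) = _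
  simp [hl]

lemma pvDfsA_sound (g t : PySem.Dict String (List String))
    (hInv : ∀ u x, x ∈ t.getD u [] → pvRP g u x) :
    ∀ (f : Nat) (v x : String), x ∈ pvDfsA t f v [] → pvRP g v x := by
  intro f
  induction f with
  | zero => intro v x hx; simp [pvDfsA] at hx
  | succ f ih =>
    intro v x hx
    by_cases hl : t.getD v [] = []
    · rw [pvDfsA_nil t f v hl] at hx
      simp at hx
    · rw [pvDfsA_eq t f v hl] at hx
      rcases List.mem_append.1 hx with h1 | h2
      · exact hInv v x h1
      · rw [List.mem_flatMap] at h2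
        obtain ⟨e, he, hx2⟩ := h2
        exact Relation.TransGen.trans (hInv v e he) (ih e x hx2)

lemma pvDfsA_complete (lines : List String) (hpre : Pre_costsOfNodes lines)
    (t : PySem.Dict String (List String))
    (hCov : ∀ u x, x ∈ (pvG lines).getD u [] → x ∈ t.getD u []) :
    ∀ (f : Nat) (v x : String), pvM lines v < f → pvRP (pvG lines) v x →
    x ∈ pvDfsA t f v [] := by
  intro f
  induction f with
  | zero => intro v x hm; omega
  | succ f ih =>
    intro v x hm hrp
    obtain ⟨w, hvw, hwx⟩ := Relation.TransGen.head'_iff.1 hrp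
    have hwl : w ∈ t.getD v [] := hCov v w hvw
    have hl : t.getD v [] ≠ [] := fun h => by rw [h] at hwl; simp at hwl
    rw [pvDfsA_eq t f v hl]
    rw [List.mem_append]
    rcases Relation.reflTransGen_iff_eq_or_transGen.1 hwx with rfl | htg
    · exact Or.inl hwl
    · refine Or.inr (List.mem_flatMap.2 ⟨w, hwl, ?_⟩)
      have hMw : pvM lines w < pvM lines v :=
        pvM_lt lines hpre v w ((pvRP_iff_RPE lines v w).1 (Relation.TransGen.single hvw))
      exact ih w x (by omega) htg

-- ---- Section 8: B's saturation loop computes exactly the reachable set ----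
lemma pvSatB_sound (g : PySem.Dict String (List String)) (v : String) :
    ∀ (f : Nat) (reach : PySem.Set String), (∀ x ∈ reach, pvRP g v x) →
    ∀ x ∈ pvSatB g f reach, pvRP g v x := by
  intro f
  induction f with
  | zero => intro reach h; exact h
  | succ f ih =>
    intro reach h x hx
    have hstep : pvSatB g (f+1) reach =
        (if PySem.Set.equal (PySem.Set.union reach (reach.flatMap (fun u => g.getD u []))) reach
         then reach
         else pvSatB g f (PySem.Set.union reach (reach.flatMap (fun u => g.getD u [])))) := rfl
    rw [hstep] at hx
    split at hx
    · exact h x hx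
    · refine ih _ ?_ x hx
      intro y hy
      rcases (PySem.Set.mem_union _ _ y).1 hy with h1 | h2
      · exact h y h1
      · rw [List.mem_flatMap] at h2
        obtain ⟨u, hu, he⟩ := h2
        exact Relation.TransGen.tail (h u hu) he

lemma pvSatB_closed (g : PySem.Dict String (List String))
    (hval : ∀ u x, x ∈ g.getD u [] → x ∈ g.keys) :
    ∀ (f : Nat) (reach : PySem.Set String), reach.Nodup → (∀ x ∈ reach, x ∈ g.keys) →
    g.keys.length + 1 ≤ f + reach.length →
    (∀ x ∈ reach, x ∈ pvSatB g f reach) ∧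
    (∀ u ∈ pvSatB g f reach, ∀ x ∈ g.getD u [], x ∈ pvSatB g f reach) := by
  intro f
  induction f with
  | zero =>
    intro reach hnd hsub hlen
    have := pvNodup_subset_length hnd hsub
    omega
  | succ f ih =>
    intro reach hnd hsub hlen
    have hstep : pvSatB g (f+1) reach =
        (if PySem.Set.equal (PySem.Set.union reach (reach.flatMap (fun u => g.getD u []))) reach
         then reach
         else pvSatB g f (PySem.Set.union reach (reach.flatMap (fun u => g.getD u [])))) := rfl
    rw [hstep]
    split
    · rename_i heq
      constructor
      · intro x hx; exact hx
      · intro u hu x hx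
        rw [PySem.Set.equal_iff] at heq
        exact (heq x).1 ((PySem.Set.mem_union _ _ x).2
          (Or.inr (List.mem_flatMap.2 ⟨u, hu, hx⟩)))
    · rename_i hne
      set bigger := PySem.Set.union reach (reach.flatMap (fun u => g.getD u [])) with hb
      have hsubb : ∀ x ∈ reach, x ∈ bigger := fun x hx =>
        (PySem.Set.mem_union _ _ x).2 (Or.inl hx)
      have hbnd : bigger.Nodup := PySem.Set.nodup_union _ _ hnd
      have hbsub : ∀ x ∈ bigger, x ∈ g.keys := by
        intro x hx
        rcases (PySem.Set.mem_union _ _ x).1 hx with h1 | h2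
        · exact hsub x h1
        · rw [List.mem_flatMap] at h2
          obtain ⟨u, _, he⟩ := h2
          exact hval u x he
      have hblen : reach.length < bigger.length := by
        have hdecomp : bigger = reach ++ List.filter (fun y => !PySem.Set.contains reach y)
            (PySem.Set.ofList (reach.flatMap (fun u => g.getD u []))) :=
          PySem.Set.update_eq_append_filter reach _
        cases hfil : List.filter (fun y => !PySem.Set.contains reach y)
            (PySem.Set.ofList (reach.flatMap (fun u => g.getD u []))) with
        | nil =>
          exfalso
          apply hne
          rw [PySem.Set.equal_iff]
          intro x
          constructor
          · intro hx
            rw [hdecomp, hfil] at hx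
            simpa using hx
          · exact hsubb x
        | cons a l =>
          rw [hdecomp, hfil]
          simp
      obtain ⟨hm, hc⟩ := ih bigger hbnd hbsub (by omega)
      exact ⟨fun x hx => hm x (hsubb x hx), hc⟩

lemma pvSatB_mem_iff (lines : List String) (k x : String) :
    x ∈ pvSatB (pvG lines) ((pvG lines).keys.length + 1)
        (PySem.Set.ofList ((pvG lines).getD k [])) ↔ pvRP (pvG lines) k x := by
  set g := pvG lines with hg
  have hval : ∀ u x, x ∈ g.getD u [] → x ∈ g.keys := fun u x h =>
    pvG_values_mem_keys lines u x h
  have hr0 : ∀ y ∈ PySem.Set.ofList (g.getD k []), y ∈ g.keys := by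
    intro y hy
    rw [PySem.Set.mem_ofList] at hy
    exact hval k y hy
  obtain ⟨hm, hc⟩ := pvSatB_closed g hval (g.keys.length + 1)
    (PySem.Set.ofList (g.getD k [])) (PySem.Set.nodup_ofList _) hr0 (by omega)
  constructor
  · apply pvSatB_sound
    intro y hy
    rw [PySem.Set.mem_ofList] at hy
    exact Relation.TransGen.single hy
  · intro hrp
    induction hrp with
    | single he => exact hm _ ((PySem.Set.mem_ofList _ _).2 he)
    | tail h1 he ih2 => exact hc _ ih2 _ he

-- B's saturation result is Nodup
lemma pvSatB_nodup (g : PySem.Dict String (List String)) :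
    ∀ (f : Nat) (reach : PySem.Set String), reach.Nodup → (pvSatB g f reach).Nodup := by
  intro f
  induction f with
  | zero => intro reach h; exact h
  | succ f ih =>
    intro reach h
    have hstep : pvSatB g (f+1) reach =
        (if PySem.Set.equal (PySem.Set.union reach (reach.flatMap (fun u => g.getD u []))) reach
         then reach
         else pvSatB g f (PySem.Set.union reach (reach.flatMap (fun u => g.getD u [])))) := rfl
    rw [hstep]
    split
    · exact h
    · exact ih _ (PySem.Set.nodup_union _ _ h)

-- ---- Section 9: the per-key counts agree, and the whole loops agree ----
lemma pvLen_eq {a b : List String} (ha : a.Nodup) (hb : b.Nodup) (h : ∀ x, x ∈ a ↔ x ∈ b) :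
    a.length = b.length := ((List.perm_ext_iff_of_nodup ha hb).2 h).length_eq

lemma pvCount_eq (lines : List String) (hpre : Pre_costsOfNodes lines)
    (t : PySem.Dict String (List String))
    (hInv : ∀ u x, x ∈ t.getD u [] → pvRP (pvG lines) u x)
    (hCov : ∀ u x, x ∈ (pvG lines).getD u [] → x ∈ t.getD u []) (k : String) :
    (PySem.Set.ofList (pvDfsA t ((pvG lines).keys.length + 1) k [])).length
      = (pvSatB (pvG lines) ((pvG lines).keys.length + 1)
          (PySem.Set.ofList ((pvG lines).getD k []))).length := by
  apply pvLen_eq (PySem.Set.nodup_ofList _) (pvSatB_nodup _ _ _ (PySem.Set.nodup_ofList _))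
  intro x
  rw [PySem.Set.mem_ofList, pvSatB_mem_iff]
  constructor
  · exact pvDfsA_sound (pvG lines) t hInv _ k x
  · intro hrp
    exact pvDfsA_complete lines hpre t hCov _ k x
      (by have := pvM_le_keys lines k; omega) hrp

lemma pvFoldA (lines : List String) (hpre : Pre_costsOfNodes lines) :
    ∀ (ks : List String) (t : PySem.Dict String (List String)) (ret : List String),
    (∀ u x, x ∈ t.getD u [] → pvRP (pvG lines) u x) →
    (∀ u x, x ∈ (pvG lines).getD u [] → x ∈ t.getD u []) →
    (ks.foldl (fun (st : PySem.Dict String (List String) × List String) k =>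
        (st.1.insert k (PySem.Set.ofList (pvDfsA st.1 ((pvG lines).keys.length + 1) k [])),
         st.2 ++ [k ++ "," ++ PySem.Int.toStr
           (((PySem.Set.ofList (pvDfsA st.1 ((pvG lines).keys.length + 1) k [])).length : Int) + 1)]))
      (t, ret)).2
    = ret ++ ks.map (fun k => k ++ "," ++ PySem.Int.toStr
        (((pvSatB (pvG lines) ((pvG lines).keys.length + 1)
            (PySem.Set.ofList ((pvG lines).getD k []))).length : Int) + 1)) := by
  intro ks
  induction ks with
  | nil => intro t ret _ _; simp
  | cons k ks ih =>
    intro t ret hInv hCov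
    rw [List.foldl_cons]
    have hcnt := pvCount_eq lines hpre t hInv hCov k
    have hInv' : ∀ u x, x ∈ (t.insert k (PySem.Set.ofList
        (pvDfsA t ((pvG lines).keys.length + 1) k []))).getD u [] → pvRP (pvG lines) u x := by
      intro u x hx
      by_cases hu : u = k
      · subst hu
        rw [PySem.Dict.getD_insert_self] at hx
        rw [PySem.Set.mem_ofList] at hx
        exact pvDfsA_sound (pvG lines) t hInv _ u x hx
      · rw [PySem.Dict.getD_insert_of_ne _ _ _ hu] at hx
        exact hInv u x hx
    have hCov' : ∀ u x, x ∈ (pvG lines).getD u [] →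
        x ∈ (t.insert k (PySem.Set.ofList
          (pvDfsA t ((pvG lines).keys.length + 1) k []))).getD u [] := by
      intro u x hx
      by_cases hu : u = k
      · subst hu
        rw [PySem.Dict.getD_insert_self, PySem.Set.mem_ofList]
        exact pvDfsA_complete lines hpre t hCov _ u x
          (by have := pvM_le_keys lines u; omega)
          (Relation.TransGen.single hx)
      · rw [PySem.Dict.getD_insert_of_ne _ _ _ hu]
        exact hCov u x hx
    rw [ih _ _ hInv' hCov']
    rw [hcnt]
    simp

-- ===== VERDICT (by name: the statement is the Claim_ definition above) =====
theorem costsOfNodes_spec : Claim_equal_costsOfNodes := by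
  intro lines _ hpre
  show costsOfNodes lines = costsOfNodes_alt lines
  simp only [costsOfNodes, costsOfNodes_alt]
  rw [pvTrieA_eq, pvGB_eq]
  rw [pvFoldA lines hpre (pvG lines).keys (pvG lines) []
    (fun u x h => Relation.TransGen.single h) (fun u x h => h)]
  rw [PySem.List.foldl_append_singleton_eq_map]
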